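-- pv_equiv track=rewrite | github.com/pypi-data/pypi-mirror-391 | packages/legalmind-ai/legalmind_ai-1.1.1.tar.gz/legalmind_ai-1.1.1/legalmind/unified_analysis_engine.py | get_analyzer_description
-- ===== SOURCE A (Python) =====
-- def get_analyzer_description(capabilities: list) -> str:
--     """Generate description berdasarkan capabilities"""
--     if any("hambantota" in str(cap).lower() for cap in capabilities):
--         return "International Contract Debt Trap Analysis"
--     elif any("international" in str(cap).lower() for cap in capabilities):
--         return "International Technology Law Analysis"
--     elif any("challenging" in str(cap).lower() for cap in capabilities):
--         return "Complex Legal Case Analysis"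
--     else:
--         return "General Legal Analysis"
-- ===== SOURCE B (Python) =====
-- _KEYWORDS = ["hambantota", "international", "challenging"]
-- _DESCRIPTIONS = [
--     "International Contract Debt Trap Analysis",
--     "International Technology Law Analysis",
--     "Complex Legal Case Analysis",
--     "General Legal Analysis",
-- ]
--
--
-- def _rank(cap):
--     text = str(cap).lower()
--     for i, kw in enumerate(_KEYWORDS):
--         if kw in text:
--             return i
--     return 3
--
--
-- def get_analyzer_description(capabilities: list) -> str:
--     best = 3
--     for cap in capabilities:
--         best = min(best, _rank(cap))
--     return _DESCRIPTIONS[best]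
-- ===== Notes on version B (the rewrite author's own statement) =====
-- stated objective: alternative
-- what changed: Replaces three separate any() scans over the list plus an elif ladder by a single pass that folds each capability's priority rank (via a keyword table) into a running minimum, then indexes a description table.
import Mathlib
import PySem

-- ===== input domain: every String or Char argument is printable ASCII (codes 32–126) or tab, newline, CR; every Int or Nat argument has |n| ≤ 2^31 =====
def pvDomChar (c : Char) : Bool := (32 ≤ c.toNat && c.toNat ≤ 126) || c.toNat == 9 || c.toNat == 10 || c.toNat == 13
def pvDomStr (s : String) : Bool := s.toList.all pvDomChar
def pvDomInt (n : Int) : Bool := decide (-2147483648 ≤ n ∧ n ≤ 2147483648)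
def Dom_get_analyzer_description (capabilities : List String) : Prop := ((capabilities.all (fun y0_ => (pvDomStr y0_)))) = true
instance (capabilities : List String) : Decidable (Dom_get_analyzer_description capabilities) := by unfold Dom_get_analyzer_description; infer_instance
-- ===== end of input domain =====

-- B replaces A's three any() scans + elif ladder by one pass folding a keyword-table rank into a running minimum (alternative decomposition, same cost class).


-- ===== PORT A =====
def get_analyzer_description (capabilities : List String) : String :=
  if capabilities.any (fun cap => PySem.Str.isIn "hambantota" (PySem.Str.lower cap)) then
    "International Contract Debt Trap Analysis"
  else if capabilities.any (fun cap => PySem.Str.isIn "international" (PySem.Str.lower cap)) then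
    "International Technology Law Analysis"
  else if capabilities.any (fun cap => PySem.Str.isIn "challenging" (PySem.Str.lower cap)) then
    "Complex Legal Case Analysis"
  else
    "General Legal Analysis"

-- ===== PORT B =====
def pvKeywords : List String := ["hambantota", "international", "challenging"]
def pvDescriptions : List String :=
  ["International Contract Debt Trap Analysis",
   "International Technology Law Analysis",
   "Complex Legal Case Analysis",
   "General Legal Analysis"]

-- the 'for i, kw in enumerate(_KEYWORDS): if kw in text: return i' loop of _rank
def pvRankGo (text : String) : List (Int × String) → Int
  | [] => 3
  | (i, kw) :: rest => if PySem.Str.isIn kw text then i else pvRankGo text rest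

def pvRank (cap : String) : Int :=
  pvRankGo (PySem.Str.lower cap) (PySem.List.enumerate pvKeywords)

def get_analyzer_description_alt (capabilities : List String) : String :=
  let best := capabilities.foldl (fun best cap => min best (pvRank cap)) 3
  (PySem.List.pyGet? pvDescriptions best).getD ""

-- ===== PRECONDITION & SPEC =====
def Spec_get_analyzer_description (capabilities : List String) (out : String) : Prop := out = get_analyzer_description_alt capabilities
instance (capabilities : List String) (out : String) : Decidable (Spec_get_analyzer_description capabilities out) := by unfold Spec_get_analyzer_description; infer_instance

-- ===== CLAIM (what is proved, stated in full; the proofs are below) =====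
def Claim_equal_get_analyzer_description : Prop := ∀ (capabilities : List String), Dom_get_analyzer_description capabilities → Spec_get_analyzer_description capabilities (get_analyzer_description capabilities)

-- ===== LEMMAS AND PROOFS =====

-- the rank A's elif ladder would assign, as an if-chain over the three any's
def pvLadderRank (capabilities : List String) : Int :=
  if capabilities.any (fun cap => PySem.Str.isIn "hambantota" (PySem.Str.lower cap)) then 0
  else if capabilities.any (fun cap => PySem.Str.isIn "international" (PySem.Str.lower cap)) then 1
  else if capabilities.any (fun cap => PySem.Str.isIn "challenging" (PySem.Str.lower cap)) then 2
  else 3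

theorem pvRank_eq (cap : String) :
    pvRank cap =
      if PySem.Str.isIn "hambantota" (PySem.Str.lower cap) then 0
      else if PySem.Str.isIn "international" (PySem.Str.lower cap) then 1
      else if PySem.Str.isIn "challenging" (PySem.Str.lower cap) then 2
      else 3 := by
  simp [pvRank, pvKeywords, PySem.List.enumerate_cons, PySem.List.enumerate_nil, pvRankGo]

theorem min_ladder (c : String) (cs : List String) :
    min (pvRank c) (pvLadderRank cs) = pvLadderRank (c :: cs) := by
  rw [pvRank_eq]
  simp only [pvLadderRank, List.any_cons, Bool.or_eq_true]
  by_cases h1 : PySem.Str.isIn "hambantota" (PySem.Str.lower c) = true <;>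
    by_cases h2 : PySem.Str.isIn "international" (PySem.Str.lower c) = true <;>
      by_cases h3 : PySem.Str.isIn "challenging" (PySem.Str.lower c) = true <;>
        by_cases h4 : cs.any (fun cap => PySem.Str.isIn "hambantota" (PySem.Str.lower cap)) = true <;>
          by_cases h5 : cs.any (fun cap => PySem.Str.isIn "international" (PySem.Str.lower cap)) = true <;>
            by_cases h6 : cs.any (fun cap => PySem.Str.isIn "challenging" (PySem.Str.lower cap)) = true <;>
              simp only [h1, h2, h3, h4, h5, h6, true_or, or_true, if_true] <;> first | omega | decide

theorem foldl_min_rank (capabilities : List String) :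
    ∀ a : Int, 0 ≤ a → a ≤ 3 →
      capabilities.foldl (fun best cap => min best (pvRank cap)) a =
        min a (pvLadderRank capabilities) := by
  induction capabilities with
  | nil => intro a _ ha; simp [pvLadderRank]; omega
  | cons c cs ih =>
    intro a ha0 ha
    have hr := pvRank_eq c
    have h0 : 0 ≤ min a (pvRank c) := by split_ifs at hr <;> omega
    have h1 : min a (pvRank c) ≤ 3 := by split_ifs at hr <;> omega
    simp only [List.foldl_cons]
    rw [ih (min a (pvRank c)) h0 h1, min_assoc, min_ladder]

theorem get_analyzer_description_spec : Claim_equal_get_analyzer_description := by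
  intro capabilities _
  unfold Spec_get_analyzer_description get_analyzer_description get_analyzer_description_alt
  rw [foldl_min_rank capabilities 3 (by omega) (by omega)]
  unfold pvLadderRank
  split_ifs <;> rfl
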